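-- pv_equiv track=rewrite | github.com/Krimesh97/assignment1 | module/database.py | run_analytics_simple
-- ===== SOURCE A (Python) =====
-- def run_analytics_simple(word_list: list | tuple):
--     num_length_GT_5 = 0
--     num_has_dup_chars = 0
--     num_same_start_end = 0
--     for word in word_list:
--         num_length_GT_5 += int(len(word) > 5)
--         num_has_dup_chars += int(len(word) > len(set(word)))
--         num_same_start_end += int(word[0] == word)
--     return num_length_GT_5, num_has_dup_chars, num_same_start_end
-- ===== SOURCE B (Python) =====
-- def run_analytics_simple(word_list: list | tuple):
--     def stats(w):
--         return (int(len(w) > 5), int(len(w) > len(set(w))), int(w[0] == w))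
--
--     def total(lo, hi):
--         if lo == hi:
--             return (0, 0, 0)
--         if hi - lo == 1:
--             return stats(word_list[lo])
--         mid = (lo + hi) // 2
--         a = total(lo, mid)
--         b = total(mid, hi)
--         return (a[0] + b[0], a[1] + b[1], a[2] + b[2])
--
--     return total(0, len(word_list))
-- ===== Notes on version B (the rewrite author's own statement) =====
-- stated objective: alternative
-- what changed: Replaces A's single fused three-counter loop with a map of each word to an indicator triple summed by divide-and-conquer over index ranges (pairwise halving recursion instead of a linear accumulator).
import Mathlib
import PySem

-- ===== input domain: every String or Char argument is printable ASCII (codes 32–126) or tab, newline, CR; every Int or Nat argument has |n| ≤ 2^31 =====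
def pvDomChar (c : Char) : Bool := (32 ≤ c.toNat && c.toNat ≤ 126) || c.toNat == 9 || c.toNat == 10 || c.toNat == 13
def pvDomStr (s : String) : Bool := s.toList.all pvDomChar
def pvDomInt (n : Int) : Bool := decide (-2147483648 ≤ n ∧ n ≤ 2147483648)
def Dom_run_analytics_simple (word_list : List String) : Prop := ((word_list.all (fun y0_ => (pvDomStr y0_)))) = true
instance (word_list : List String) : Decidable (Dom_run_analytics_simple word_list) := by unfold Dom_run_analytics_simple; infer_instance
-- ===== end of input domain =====

-- B replaces A's fused three-counter accumulator loop by a per-word indicator triple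
-- combined with a divide-and-conquer (halving) summation over index ranges (alternative decomposition, same cost).

-- ===== PORT A =====
-- A: one fold carrying the triple of counters, each step incrementing all three.
-- word[0] raises IndexError on an empty word; Pre_ excludes that, the 'none' branch is unreached under Pre_.
def run_analytics_simple (word_list : List String) : Int × Int × Int :=
  word_list.foldl
    (fun (acc : Int × Int × Int) w =>
      (acc.1 + (if w.toList.length > 5 then (1:Int) else 0),
       acc.2.1 + (if w.toList.length > (PySem.Set.ofList w.toList).length then (1:Int) else 0),
       acc.2.2 + (match PySem.Str.pyGet? w 0 with
                  | some c => if String.ofList [c] = w then (1:Int) else 0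
                  | none => 0)))
    (0, 0, 0)

-- ===== PORT B =====
-- B's helper stats(w): the indicator triple of one word.
def pvStats (w : String) : Int × Int × Int :=
  (if w.toList.length > 5 then (1:Int) else 0,
   if w.toList.length > (PySem.Set.ofList w.toList).length then (1:Int) else 0,
   match PySem.Str.pyGet? w 0 with
   | some c => if String.ofList [c] = w then (1:Int) else 0
   | none => 0)

-- B's helper total(lo, hi): divide-and-conquer sum of stats over word_list[lo:hi].
-- (Totality guards only: getD's "" default is unreached since the recursion keeps lo < word_list.length,
-- and 'hi ≤ lo' coincides with Python's 'lo == hi' test on every reached input, where lo ≤ hi.)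
def pvTotal (word_list : List String) (lo hi : Nat) : Int × Int × Int :=
  if hi ≤ lo then (0, 0, 0)
  else if hi - lo = 1 then pvStats (word_list.getD lo "")
  else
    let mid := (lo + hi) / 2
    let a := pvTotal word_list lo mid
    let b := pvTotal word_list mid hi
    (a.1 + b.1, a.2.1 + b.2.1, a.2.2 + b.2.2)
termination_by hi - lo
decreasing_by all_goals omega

def run_analytics_simple_alt (word_list : List String) : Int × Int × Int :=
  pvTotal word_list 0 word_list.length

-- ===== PRECONDITION & SPEC =====
-- Pre_ excludes lists containing an empty word: there word[0] raises IndexError in both A and B.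
def Pre_run_analytics_simple (word_list : List String) : Prop := ∀ w ∈ word_list, w ≠ ""
instance (word_list : List String) : Decidable (Pre_run_analytics_simple word_list) := by unfold Pre_run_analytics_simple; infer_instance
def pvWitness_run_analytics_simple : List String := ["banana", "a", "xy"]

def Spec_run_analytics_simple (word_list : List String) (out : Int × Int × Int) : Prop := out = run_analytics_simple_alt word_list
instance (word_list : List String) (out : Int × Int × Int) : Decidable (Spec_run_analytics_simple word_list out) := by unfold Spec_run_analytics_simple; infer_instance

-- ===== CLAIM (what is proved, stated in full; the proofs are below) =====
def Claim_equal_run_analytics_simple : Prop := ∀ (word_list : List String), Dom_run_analytics_simple word_list → Pre_run_analytics_simple word_list → Spec_run_analytics_simple word_list (run_analytics_simple word_list)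

-- ===== LEMMAS AND PROOFS =====
-- Triple-sum of stats over a list (proof-only reference function).
def pvSum3 (l : List String) : Int × Int × Int :=
  l.foldr (fun w r => ((pvStats w).1 + r.1, (pvStats w).2.1 + r.2.1, (pvStats w).2.2 + r.2.2)) (0, 0, 0)

lemma pvSum3_append (l1 l2 : List String) :
    pvSum3 (l1 ++ l2) = ((pvSum3 l1).1 + (pvSum3 l2).1, (pvSum3 l1).2.1 + (pvSum3 l2).2.1,
      (pvSum3 l1).2.2 + (pvSum3 l2).2.2) := by
  induction l1 with
  | nil => simp [pvSum3]
  | cons x xs ih => simp [pvSum3] at ih ⊢; rw [ih]; refine ⟨by ring, by ring, by ring⟩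

lemma pvTotal_eq_sum3 (wl : List String) (lo hi : Nat) (h1 : lo ≤ hi) (h2 : hi ≤ wl.length) :
    pvTotal wl lo hi = pvSum3 ((wl.drop lo).take (hi - lo)) := by
  induction lo, hi using pvTotal.induct wl with
  | case1 lo hi heq =>
    have hle : lo = hi := by omega
    subst hle; rw [pvTotal]; simp [pvSum3]
  | case2 lo hi hne hone =>
    rw [pvTotal]; simp only [if_neg hne, if_pos hone]
    have hlt : lo < wl.length := by omega
    rw [hone]
    have hget : wl.getD lo "" = wl[lo] := List.getD_eq_getElem wl "" hlt
    have htake : (wl.drop lo).take 1 = [wl[lo]] := by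
      rw [List.drop_eq_getElem_cons hlt, List.take_succ_cons, List.take_zero]
    rw [hget, htake]
    simp [pvSum3]
  | case3 lo hi hne hone mid ih1 ih2 =>
    rw [pvTotal]; simp only [if_neg hne, if_neg hone]
    have hmid1 : lo ≤ (lo + hi) / 2 := by omega
    have hmid2 : (lo + hi) / 2 ≤ hi := by omega
    rw [ih1 hmid1 (by omega), ih2 hmid2 h2]
    have hsplit : (wl.drop lo).take (hi - lo)
        = (wl.drop lo).take ((lo + hi) / 2 - lo)
          ++ ((wl.drop lo).drop ((lo + hi) / 2 - lo)).take (hi - (lo + hi) / 2) := by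
      have : hi - lo = ((lo + hi) / 2 - lo) + (hi - (lo + hi) / 2) := by omega
      rw [this, List.take_add]
    rw [hsplit, List.drop_drop, pvSum3_append]
    have hm : mid = (lo + hi) / 2 := rfl
    have h4 : lo + ((lo + hi) / 2 - lo) = (lo + hi) / 2 := by omega
    simp only [hm, h4]

lemma runA_acc (l : List String) (a b c : Int) :
    l.foldl
      (fun (acc : Int × Int × Int) w =>
        (acc.1 + (if w.toList.length > 5 then (1:Int) else 0),
         acc.2.1 + (if w.toList.length > (PySem.Set.ofList w.toList).length then (1:Int) else 0),
         acc.2.2 + (match PySem.Str.pyGet? w 0 with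
                    | some c => if String.ofList [c] = w then (1:Int) else 0
                    | none => 0)))
      (a, b, c)
    = (a + (pvSum3 l).1, b + (pvSum3 l).2.1, c + (pvSum3 l).2.2) := by
  induction l generalizing a b c with
  | nil => simp [pvSum3]
  | cons x xs ih =>
    simp only [List.foldl_cons, ih, pvSum3, List.foldr_cons, pvStats]
    refine Prod.ext ?_ (Prod.ext ?_ ?_) <;> simp <;> ring

-- ===== VERDICT (by name: the statement is the Claim_ definition above) =====
theorem run_analytics_simple_spec : Claim_equal_run_analytics_simple := by
  intro word_list _ _
  show run_analytics_simple word_list = _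
  unfold run_analytics_simple run_analytics_simple_alt
  rw [runA_acc, pvTotal_eq_sum3 word_list 0 word_list.length (Nat.zero_le _) le_rfl]
  simp
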